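-- pv_equiv track=rewrite | github.com/Leewonchan14/CodingTest | 백준/Gold/15661. 링크와 스타트/링크와 스타트.py | sumTeam
-- ===== SOURCE A (Python) =====
-- def sumTeam(arr, n, team):
--     li = []
--
--     def recur(sumv):
--         if len(li) == 2:
--             a, b = li
--             return sumv + arr[team[a]][team[b]]
--
--         for i in range(n):
--             li.append(i)
--             sumv = recur(sumv)
--             li.pop()
--
--         return sumv
--
--     return recur(0)
-- ===== SOURCE B (Python) =====
-- def sumTeam(arr, n, team):
--     total = 0
--     for i in range(n):
--         for j in range(n):
--             total += arr[team[i]][team[j]]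
--     return total
-- ===== Notes on version B (the rewrite author's own statement) =====
-- stated objective: simpler
-- what changed: Replaces the accumulator-threading recursion that builds a two-element index list with a direct nested for-loop over the same index pairs, summed in the same order.
import Mathlib
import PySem

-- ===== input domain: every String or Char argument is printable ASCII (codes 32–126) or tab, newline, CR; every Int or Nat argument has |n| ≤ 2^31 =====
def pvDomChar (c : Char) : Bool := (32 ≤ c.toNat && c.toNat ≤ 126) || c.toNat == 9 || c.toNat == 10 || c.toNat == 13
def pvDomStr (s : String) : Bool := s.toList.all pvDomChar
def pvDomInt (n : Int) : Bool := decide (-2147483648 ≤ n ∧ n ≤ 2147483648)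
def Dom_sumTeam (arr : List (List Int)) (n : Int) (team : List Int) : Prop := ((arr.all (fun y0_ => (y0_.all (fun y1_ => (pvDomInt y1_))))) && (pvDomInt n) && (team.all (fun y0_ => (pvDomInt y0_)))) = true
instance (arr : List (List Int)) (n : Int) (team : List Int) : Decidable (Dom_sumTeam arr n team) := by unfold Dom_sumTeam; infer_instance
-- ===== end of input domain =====

-- B replaces A's list-building recursion with a direct nested loop over index pairs (objective: simpler).

-- ===== PORT A =====
-- arr[team[a]][team[b]], ported with pyGet? (Python index semantics); the .getD defaults
-- are only reached outside Pre_sumTeam (where the Python raises IndexError).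
def pvCell (arr : List (List Int)) (team : List Int) (a b : Int) : Int :=
  (PySem.List.pyGet? ((PySem.List.pyGet? arr ((PySem.List.pyGet? team a).getD 0)).getD [])
    ((PySem.List.pyGet? team b).getD 0)).getD 0

-- recur(sumv) closing over li; fuel bounds the recursion depth (Python reaches depth ≤ 2,
-- since li grows by one per call and the base case fires at length 2).
def pvRecurA (arr : List (List Int)) (n : Int) (team : List Int) : Nat → List Int → Int → Int
  | 0, _, sumv => sumv
  | fuel + 1, li, sumv =>
    if li.length = 2 then
      sumv + pvCell arr team (li.getD 0 0) (li.getD 1 0)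
    else
      (PySem.List.pyRange 0 n 1).foldl
        (fun s i => pvRecurA arr n team fuel (li ++ [i]) s) sumv

def sumTeam (arr : List (List Int)) (n : Int) (team : List Int) : Int :=
  pvRecurA arr n team 3 [] 0

-- ===== PORT B =====
def sumTeam_alt (arr : List (List Int)) (n : Int) (team : List Int) : Int :=
  (PySem.List.pyRange 0 n 1).foldl
    (fun total i =>
      (PySem.List.pyRange 0 n 1).foldl
        (fun total j => total + pvCell arr team i j) total)
    0

-- ===== PRECONDITION & SPEC =====
-- Pre_ excludes exactly the inputs on which A raises IndexError: some index i < n beyond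
-- team's range, or some team value (Python index semantics, negative = from the end)
-- outside arr or outside the selected row.
def pvNorm (len : Nat) (i : Int) : Nat := (if i < 0 then i + len else i).toNat

def Pre_sumTeam (arr : List (List Int)) (n : Int) (team : List Int) : Prop :=
  n.toNat ≤ team.length ∧
  ∀ t ∈ team.take n.toNat,
    (-(arr.length : Int) ≤ t ∧ t < arr.length) ∧
    ∀ u ∈ team.take n.toNat,
      -(((arr.getD (pvNorm arr.length t) []).length : Int)) ≤ u ∧
        u < (arr.getD (pvNorm arr.length t) []).length
instance (arr : List (List Int)) (n : Int) (team : List Int) : Decidable (Pre_sumTeam arr n team) := by unfold Pre_sumTeam; infer_instance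

def pvWitness_sumTeam : List (List Int) × Int × List Int := ([[1, 2], [3, 4]], 2, [0, 1])

def Spec_sumTeam (arr : List (List Int)) (n : Int) (team : List Int) (out : Int) : Prop := out = sumTeam_alt arr n team
instance (arr : List (List Int)) (n : Int) (team : List Int) (out : Int) : Decidable (Spec_sumTeam arr n team out) := by unfold Spec_sumTeam; infer_instance

-- ===== CLAIM (what is proved, stated in full; the proofs are below) =====
def Claim_equal_sumTeam : Prop := ∀ (arr : List (List Int)) (n : Int) (team : List Int), Dom_sumTeam arr n team → Pre_sumTeam arr n team → Spec_sumTeam arr n team (sumTeam arr n team)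

-- ===== LEMMAS AND PROOFS =====
-- (unfolding the two fuel levels of pvRecurA reduces A's recursion to B's nested folds)

-- ===== VERDICT (by name: the statement is the Claim_ definition above) =====
theorem sumTeam_spec : Claim_equal_sumTeam := by
  intro arr n team _ _
  show sumTeam arr n team = sumTeam_alt arr n team
  simp [sumTeam, sumTeam_alt, pvRecurA]
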